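-- pv_equiv track=rewrite | github.com/Xiaobei-debug/MMTAGE | data.py | aa_index
-- ===== SOURCE A (Python) =====
-- alphabets = {
--     "PAD": 0,
--     "A": 1,
--     "R": 2,
--     "N": 3,
--     "D": 4,
--     "C": 5,
--     "Q": 6,
--     "E": 7,
--     "G": 8,
--     "H": 9,
--     "I": 10,
--     "L": 11,
--     "K": 12,
--     "M": 13,
--     "F": 14,
--     "P": 15,
--     "S": 16,
--     "T": 17,
--     "W": 18,
--     "Y": 19,
--     "V": 20,
--     "*": 21,
--     "MASK": 22,
--     "CLS": 23,
--     "BOS": 24,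
-- }
--
-- def aa_index(tcr, max_len=25):
--     tcr_index = [23]
--     tcr_index_no_pad = [23]
--     tcr_att = [True]
--     for i in range(max_len):
--         if i < len(tcr):
--             tcr_index.append(alphabets[tcr[i]])
--             tcr_index_no_pad.append(alphabets[tcr[i]])
--             tcr_att.append(True)
--         else:
--             tcr_index.append(0)
--             tcr_att.append(False)
--     return tcr_index, tcr_index_no_pad, tcr_att
-- ===== SOURCE B (Python) =====
-- alphabets = {
--     "PAD": 0,
--     "A": 1,
--     "R": 2,
--     "N": 3,
--     "D": 4,
--     "C": 5,
--     "Q": 6,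
--     "E": 7,
--     "G": 8,
--     "H": 9,
--     "I": 10,
--     "L": 11,
--     "K": 12,
--     "M": 13,
--     "F": 14,
--     "P": 15,
--     "S": 16,
--     "T": 17,
--     "W": 18,
--     "Y": 19,
--     "V": 20,
--     "*": 21,
--     "MASK": 22,
--     "CLS": 23,
--     "BOS": 24,
-- }
--
-- def aa_index(tcr, max_len=25):
--     def enc(chars, k):
--         # structural recursion on the remaining characters with budget k;
--         # once the characters run out, all remaining budget is padding at once
--         if k <= 0:
--             return [], [], []
--         if chars:
--             v = alphabets[chars[0]]
--             idx, no_pad, att = enc(chars[1:], k - 1)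
--             return [v] + idx, [v] + no_pad, [True] + att
--         return [0] * k, [], [False] * k
--     idx, no_pad, att = enc(list(tcr), max_len)
--     return [23] + idx, [23] + no_pad, [True] + att
-- ===== Notes on version B (the rewrite author's own statement) =====
-- stated objective: alternative
-- what changed: Replaces A's index loop over range(max_len) with a guarded branch per position by a structural recursion on the character list with a countdown budget, emitting all remaining padding in one bulk step at the base case.
import Mathlib
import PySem

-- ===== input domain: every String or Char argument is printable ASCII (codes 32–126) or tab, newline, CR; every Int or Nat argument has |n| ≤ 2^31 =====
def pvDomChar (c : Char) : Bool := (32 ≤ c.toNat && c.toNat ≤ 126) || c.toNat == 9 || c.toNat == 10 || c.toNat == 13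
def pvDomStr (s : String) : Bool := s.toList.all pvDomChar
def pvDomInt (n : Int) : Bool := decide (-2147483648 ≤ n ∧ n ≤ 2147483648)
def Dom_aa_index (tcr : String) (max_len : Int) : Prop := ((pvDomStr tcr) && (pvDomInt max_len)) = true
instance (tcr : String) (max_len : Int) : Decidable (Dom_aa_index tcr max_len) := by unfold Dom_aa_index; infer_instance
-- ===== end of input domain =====

-- B replaces A's range(max_len) loop with a per-position guard by a structural recursion on the
-- character list with a countdown budget, padding emitted in one bulk step (objective: alternative).

-- ===== PORT A =====
-- the module-level dict `alphabets`, restricted to its single-character keys: the multi-character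
-- keys ("PAD", "MASK", "CLS", "BOS") can never equal the one-character string tcr[i], so dropping
-- them is exact for every lookup either program performs.
def aaTable : List (Char × Int) :=
  [('A',1),('R',2),('N',3),('D',4),('C',5),('Q',6),('E',7),('G',8),('H',9),('I',10),
   ('L',11),('K',12),('M',13),('F',14),('P',15),('S',16),('T',17),('W',18),('Y',19),('V',20),('*',21)]

-- alphabets[c]; the default 0 is unreachable under Pre_aa_index (Python raises KeyError there)
def alph (c : Char) : Int := (aaTable.lookup c).getD 0

-- loop body of A, one step per i of range(max_len)
def aaStep (L : List Char) (st : List Int × List Int × List Bool) (i : Int) :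
    List Int × List Int × List Bool :=
  if i < PySem.List.len L then
    (st.1 ++ [alph (PySem.List.pyGetD L i ' ')],
     st.2.1 ++ [alph (PySem.List.pyGetD L i ' ')],
     st.2.2 ++ [true])
  else
    (st.1 ++ [0], st.2.1, st.2.2 ++ [false])

def aa_index (tcr : String) (max_len : Int) : List Int × List Int × List Bool :=
  (PySem.List.pyRange 0 max_len).foldl (aaStep tcr.toList) ([23], [23], [true])

-- ===== PORT B =====
-- the inner recursive helper `enc` of Source B: recursion on the character list with budget k
def aaEnc (chars : List Char) (k : Int) : List Int × List Int × List Bool :=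
  if k ≤ 0 then ([], [], [])
  else
    match chars with
    | c :: rest =>
      let v := alph c
      let r := aaEnc rest (k - 1)
      (v :: r.1, v :: r.2.1, true :: r.2.2)
    | [] => (List.replicate k.toNat 0, [], List.replicate k.toNat false)
termination_by k.toNat
decreasing_by omega

def aa_index_alt (tcr : String) (max_len : Int) : List Int × List Int × List Bool :=
  let r := aaEnc tcr.toList max_len
  (23 :: r.1, 23 :: r.2.1, true :: r.2.2)

-- ===== PRECONDITION & SPEC =====
-- Pre_ excludes exactly the inputs where A raises KeyError: some character among the first
-- max(max_len,0) characters of tcr is not a key of the alphabet table.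
def Pre_aa_index (tcr : String) (max_len : Int) : Prop :=
  (tcr.toList.take (max max_len 0).toNat).all (fun c => (aaTable.lookup c).isSome) = true
instance (tcr : String) (max_len : Int) : Decidable (Pre_aa_index tcr max_len) := by
  unfold Pre_aa_index; infer_instance
def pvWitness_aa_index : String × Int := ("ARC", 5)

def Spec_aa_index (tcr : String) (max_len : Int) (out : List Int × List Int × List Bool) : Prop := out = aa_index_alt tcr max_len
instance (tcr : String) (max_len : Int) (out : List Int × List Int × List Bool) : Decidable (Spec_aa_index tcr max_len out) := by unfold Spec_aa_index; infer_instance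

-- ===== CLAIM (what is proved, stated in full; the proofs are below) =====
def Claim_equal_aa_index : Prop := ∀ (tcr : String) (max_len : Int), Dom_aa_index tcr max_len → Pre_aa_index tcr max_len → Spec_aa_index tcr max_len (aa_index tcr max_len)

-- ===== LEMMAS AND PROOFS =====

-- invariant of A's loop: after the first n iterations the three lists are the encoded
-- prefix followed by the padding block
lemma aa_fold (L : List Char) (n : Nat) :
    (PySem.List.pyRange 0 (n : Int)).foldl (aaStep L) ([23], [23], [true]) =
      (23 :: ((L.take n).map alph ++ List.replicate (n - min n L.length) 0),
       23 :: (L.take n).map alph,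
       true :: (List.replicate (min n L.length) true ++ List.replicate (n - min n L.length) false)) := by
  induction n with
  | zero => simp [PySem.List.pyRange]
  | succ n ih =>
    have h : (((n : Int)) + 1) = ((n + 1 : Nat) : Int) := by push_cast; ring
    rw [← h, PySem.List.pyRange_one_succ_right (by positivity), List.foldl_append, ih]
    simp only [List.foldl_cons, List.foldl_nil, aaStep, PySem.List.len_eq]
    by_cases hn : n < L.length
    · rw [if_pos (by exact_mod_cast hn)]
      have hk : min n L.length = n := Nat.min_eq_left (Nat.le_of_lt hn)
      have hk1 : min (n + 1) L.length = n + 1 := Nat.min_eq_left hn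
      have hget : PySem.List.pyGetD L ((n : Int)) ' ' = L[n] := by
        simp [List.getElem?_eq_getElem hn]
      have htake : (L.take (n + 1)).map alph = (L.take n).map alph ++ [alph L[n]] := by
        rw [List.take_add_one, List.getElem?_eq_getElem hn]
        simp only [Option.toList_some, List.map_append, List.map_cons, List.map_nil]
      rw [hget, hk, hk1, htake]
      simp [List.replicate_succ']
    · have hLn : L.length ≤ n := Nat.le_of_not_lt hn
      rw [if_neg (by exact_mod_cast hn)]
      rw [Nat.min_eq_right hLn, Nat.min_eq_right (Nat.le_succ_of_le hLn),
        List.take_of_length_le hLn, List.take_of_length_le (Nat.le_succ_of_le hLn),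
        Nat.succ_sub hLn]
      simp [List.replicate_succ']

-- B's recursion at a nonnegative budget, written as A's invariant shape
lemma enc_eq (L : List Char) (n : Nat) :
    aaEnc L (n : Int) =
      ((L.take n).map alph ++ List.replicate (n - min n L.length) 0,
       (L.take n).map alph,
       List.replicate (min n L.length) true ++ List.replicate (n - min n L.length) false) := by
  induction L generalizing n with
  | nil =>
    rw [aaEnc.eq_def]
    cases n with
    | zero => simp
    | succ m => rw [if_neg (by omega)]; simp
  | cons c rest ih =>
    rw [aaEnc.eq_def]
    cases n with
    | zero => simp
    | succ m =>
      rw [if_neg (by omega)]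
      have : ((m + 1 : Nat) : Int) - 1 = ((m : Nat) : Int) := by push_cast; ring
      simp only [this, ih m]
      simp [List.take_succ_cons, Nat.succ_min_succ, Nat.succ_sub_succ, List.replicate_succ]

-- ===== VERDICT (by name: the statement is the Claim_ definition above) =====
theorem aa_index_spec : Claim_equal_aa_index := by
  intro tcr max_len _hdom _hpre
  unfold Spec_aa_index
  by_cases h : max_len ≤ 0
  · have e0 : aa_index_alt tcr max_len = ([23], [23], [true]) := by
      simp only [aa_index_alt]
      rw [aaEnc.eq_def, if_pos h]
    rw [e0]
    simp only [aa_index, PySem.List.pyRange_one_eq_nil h, List.foldl_nil]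
  · obtain ⟨n, rfl⟩ : ∃ n : Nat, max_len = (n : Int) := ⟨max_len.toNat, by omega⟩
    simp only [aa_index_alt, enc_eq]
    simp only [aa_index]
    exact aa_fold tcr.toList n
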